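/- GENERATED by mk_final_copies.py from the proof of the farm's unit `start_decoder.C8a` (farm:start_decoder.C8a.1: Lemmas.lean) as the
   re-elaboration sweep compiled it — do not edit. -/
import Asan.CheckWalk
import Vorbis.Spec.Units.start_decoder_C8a
import Vorbis.Spec.StartDecoderCarry
import Vorbis.Spec.StartDecoderC7
import Vorbis.Spec.StartDecoderC8

/-!
  The unit `start_decoder.C8a` (0x1146f5 … 0x11470a + 0x1149f3 … 0x1149ff; stb_vorbis_fixed.c 3851 – 3853):
      lea rdi,[r14+840H] ; call __asan_load4_noabort ; mov eax,[r14+840H] ; test eax,eax ; jne 0x1149f3        (SE = 0: the join 0x114710)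
      lea esi,[rax*4+4] ; mov rdi,[rsp+18H] ; call setup_malloc                                                (SE ≥ 1: cut138 = 0x114a04)
  on the pattern of farm/worked/start_decoder.C14a (the allocator call, both arms) and C7a (the check, `C7.built_through`).
      c8a_obj_where     where `*f` is                      c8a_malloc_pre   `setup_malloc`'s precondition at 0x1149ff
      c8a_tblock_kept   a temp block over an allocator's footprint
      c8a_fail_wins     the push + a REFUSED request's footprint as ONE footprint of `AllocWin` windows (success arm: `alloc_call_same`)
      c8a_lengths_kept  the bytes of `lengths` over the call (a setup block or the temp block P1)
      c8a_lea           `lea esi,[rax*4+4]`: the request is `4·(SE+1)`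
      c8a_build         PURE: `At8M1`'s body from `InC8` and what `Cur.alloc_call` / `Cur.alloc_fail_any` return (both arms)
      c8a_join          PURE: `In8S` at the join for `SE = 0`
      c8a_walk          the walk
-/

open X86 X86.User Asan Vorbis Vorbis.Spec Vorbis.Spec.StartDecoder

set_option maxRecDepth 100000
set_option maxHeartbeats 4000000

namespace Vorbis.Spec.start_decoder_C8a

/-- **Where `*f` is** (a stack object of stb_vorbis_open_memory, or an object of `A.2`): in the data space, and off the part of the
stack below the steady stack pointer `R` — what reading a field of `*f` through the function's own pushes needs. -/
theorem c8a_obj_where {g : Ghost} {i : Nat} {A2 A3 Ai : Arena} {A : Arena × List Obj} {v : State} (h : Cur g i A2 A3 Ai A v)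
    (hsh : ShadowInv A.2 g.frames' g.R v.mem) (hoff : ∀ o, o ∈ A.2 → L.textHi ≤ o.base) :
    0x119d40 ≤ g.f ∧ g.f + 1808 ≤ 0xC00000 ∧ (g.R ≤ g.f ∨ g.f + 1808 ≤ 0x700000 ∨ 0x800000 ≤ g.f) := by
  have hl : LiveIn A.2 g.frames' g.f Off.sizeof.stb_vorbis := by
    apply h.hand.obj.mono
    intro o ho
    unfold Ghost.frames'
    rw [stackObjs_cons]
    rcases List.mem_append.mp ho with hs | ho'
    · exact List.mem_append_left _ (List.mem_append_right _ hs)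
    · exact List.mem_append_right _ ho'
  have hw := hl.where_ hsh hoff (by simp only [voff]; omega)
  simp only [voff] at hw
  exact hw

/-- **`setup_malloc`'s precondition at 0x1149ff**: the state `s` at the callee's entry has the memory of the cut point but for the pushed
return address below `R` (`hmem`), `rsp = R − 8`, `rdi = f`. -/
theorem c8a_malloc_pre {u₀ : State} {g : Ghost} {i : Nat} {A2 A3 Ai : Arena} {A : Arena × List Obj} {pc : Word} {v s : State}
    (hfr : Frame u₀ g pc A v) (hcur : Cur g i A2 A3 Ai A v) (hun : ShadowUntouched v.mem s.mem)
    (hmem : Mem.EqOn (g.f + 112) (g.f + 136) v.mem s.mem) (hrsp : (s.reg .rsp).toNat + 8 = g.R)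
    (hrdi : (s.reg .rdi).toNat = g.f) : (setup_malloc.spec A.2 g.frames' A.1).pre s := by
  have hob := hcur.sd.bits.OB1
  obtain ⟨hf1, hf2, _⟩ := c8a_obj_where hcur hfr.shadow hfr.offText
  refine ⟨⟨?_, hfr.offText⟩, ?_, ?_, hcur.hand.arenaText⟩
  · rw [hrsp]
    exact hfr.shadow.untouched hun
  · rw [hrdi]
    exact hcur.sd.env.live _ hob
  · rw [hrdi]
    apply hcur.sd.arena.frame (by simp only [voff]; omega)
    simp only [voff]
    exact hmem

/-- **A temp block over an allocator's footprint**: the callee's stack, `setup_memory_required`, the two offsets and shadow bytes of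
the arena are all outside `[B + T, B + L)`. What `lenL`, CNT and VAL of a SPARSE book (their arrays are temp blocks, no blocks of
`A.1.Blk`) need over `setup_malloc`. -/
theorem c8a_tblock_kept {g : Ghost} {A : Arena × List Obj} {m m' : Mem} {ws : List Span} {q n : Nat} (hp : Pos g A)
    (ha : ArenaOK A.1 A.2 m g.f) (hs : Mem.SameExcept ws m m') (hw : ∀ w, w ∈ ws → AllocWin g A w) (hq : A.1.TBlock q n) :
    (Block.mk q n).Kept m m' := by
  have hr := ha.tblock_range hq
  have ho := ha.tblock_off hq
  have hl := le_r8 n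
  obtain ⟨p1, p2, p3, p4, p5, p6, p7, p8, p9, p10, p11, p12, p13, p14⟩ := hp
  apply Block.Kept.of_sameExcept hs
  · intro w hww
    have k := hw w hww
    unfold AllocWin at k
    simp only []
    omega
  · simp only []
    omega

/-- **The push of the return address and a refused request's footprint as ONE footprint of `AllocWin` windows** (the last conjunct
of the failure clause of `setup_malloc.spec`: the stack window and `setup_memory_required`). -/
theorem c8a_fail_wins {g : Ghost} {A : Arena × List Obj} {m ms mr : Mem} {a : Word} {x sp f' : Nat} (hp : Pos g A)
    (hmem : ms = m.writeLE a 8 x) (ha : a.toNat + 8 = g.R) (hsp : sp + 8 = g.R) (hf : f' = g.f)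
    (hs : Mem.SameExcept [⟨sp - 80, sp⟩, ⟨f' + 8, f' + 12⟩] ms mr) :
    ∃ ws, Mem.SameExcept ws m mr ∧ ∀ w, w ∈ ws → AllocWin g A w := by
  have p1 := hp.r_eq
  have p2 := hp.ra_hi
  have p3 := hp.ra_lo
  refine ⟨[⟨g.R - 88, g.R⟩, ⟨g.f + 8, g.f + 12⟩], ?_, ?_⟩
  · refine Mem.SameExcept.trans (ν := ms) ?_ ?_
    · rw [hmem]
      apply Mem.SameExcept.writeLE
      · omega
      · refine ⟨_, List.mem_cons_self, ?_, ?_⟩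
        · simp only []
          omega
        · simp only []
          omega
    · apply hs.mono
      intro w hw b h1 h2
      simp only [List.mem_cons, List.mem_nil_iff, or_false] at hw
      rcases hw with rfl | rfl
      · simp only [] at h1 h2
        exact ⟨_, List.mem_cons_self, by simp only []; omega, by simp only []; omega⟩
      · simp only [] at h1 h2
        exact ⟨_, List.mem_cons_of_mem _ List.mem_cons_self, by simp only []; omega, by simp only []; omega⟩
  · intro w hw
    simp only [List.mem_cons, List.mem_nil_iff, or_false] at hw
    unfold AllocWin
    rcases hw with rfl | rfl
    · left
      simp only []
      omega
    · right
      left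
      simp only []
      omega

/-- **The contents of the `lengths` array over the call**: a block of the snapshot `Aw` (dense: `codeword_lengths`), or the temp block
P1 (sparse). -/
theorem c8a_lengths_kept {g : Ghost} {i : Nat} {A2 A3 Ai Aw : Arena} {A : Arena × List Obj} {lengths values : Nat} {v : State}
    {m' : Mem} (hb : Built g i A2 A3 Ai Aw A lengths values v) (hkept : AllKept A.1.Blk v.mem m')
    (htk : ∀ q n, A.1.TBlock q n → (Block.mk q n).Kept v.mem m') :
    (Block.mk lengths (Codebook.entries v.mem (g.cb v.mem i)).toNat).Kept v.mem m' := by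
  rcases hb.k2.sparse_01 with hsp | hsp
  · have hl := hb.dense_lengths hsp
    rw [← hb.dense_eq hsp] at hl
    exact hkept _ (hl.1.mono hb.extw')
  · exact htk _ _ ((hb.sparse_temps hsp).tblock (p := lengths)
      (List.mem_cons_of_mem _ (List.mem_cons_of_mem _ List.mem_cons_self)))

/-- **`At8M1`'s body from the return of the allocator, pure part** (both arms): `Frame` and `Cur` at the returned state `w` for the
ghost `A'` (the grown one, or `A` itself), `cb(i)` unmoved, every setup block and every temp block of `A` kept, rbx and r12 kept,
`1 ≤ SE` (the `jne` taken) and the allocator's result. The snapshot `Ab` is `A.1`, the arena before the call. -/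
theorem c8a_build {u₀ : State} {g : Ghost} {i : Nat} {A2 A3 Ai Aw : Arena} {A A' : Arena × List Obj} {lengths values : Nat}
    {v w : State} (h : InC8 u₀ g i A2 A3 Ai Aw A lengths values v) (hF : Frame u₀ g L.start_decoder.cut138 A' w)
    (hC : Cur g i A2 A3 Ai A' w) (hcb : g.cb w.mem i = g.cb v.mem i) (hkept : AllKept A.1.Blk v.mem w.mem)
    (htk : ∀ q n, A.1.TBlock q n → (Block.mk q n).Kept v.mem w.mem)
    (hext : A.1.Extends A'.1) (htemps : A'.1.temps = A.1.temps) (hB : A'.1.B = A.1.B)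
    (hrbx : w.reg .rbx = v.reg .rbx) (hr12 : w.reg .r12 = v.reg .r12)
    (hse : 1 ≤ Codebook.sorted_entries v.mem (g.cb v.mem i))
    (halloc : w.reg .rax = 0 ∨
      Since A.1 A'.1 ⟨(w.reg .rax).toNat, 4 * ((Codebook.sorted_entries v.mem (g.cb v.mem i)).toNat + 1)⟩) :
    In8M u₀ g i A2 A3 Ai Aw A.1 A' lengths values L.start_decoder.cut138 w ∧
      Codebook.sorted_codewords w.mem (g.cb w.mem i) = 0 ∧
      Codebook.sorted_values w.mem (g.cb w.mem i) = 0 ∧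
      (w.reg .rax = 0 ∨
        Since A.1 A'.1 ⟨(w.reg .rax).toNat, 4 * ((Codebook.sorted_entries w.mem (g.cb w.mem i)).toNat + 1)⟩) := by
  have hb := h.built
  have hcbOK := hb.cur.ages.cbOK
  have hkI : AllKept Ai.Blk v.mem w.mem := fun B hB => hkept B (hB.mono hb.cur.ages.exti)
  have hstruct : (Codebook.block (g.cb v.mem i)).Kept v.mem w.mem := hcbOK.cb_kept (hkI _ hcbOK.F2) i hb.cur.lt
  have e := Codebook.SameFields.of_kept hstruct
  have hlen := c8a_lengths_kept hb hkept htk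
  have hlenE := hlen.same
  have hlenI := hlen.inside
  simp only [vblock] at hlenE hlenI
  have eused : usedCount w.mem lengths (Codebook.entries v.mem (g.cb v.mem i)).toNat =
      usedCount v.mem lengths (Codebook.entries v.mem (g.cb v.mem i)).toNat := C7.usedCount_same hlenE hlenI
  have elong : longCount w.mem lengths (Codebook.entries v.mem (g.cb v.mem i)).toNat =
      longCount v.mem lengths (Codebook.entries v.mem (g.cb v.mem i)).toNat := C7.longCount_same hlenE hlenI
  have hcore : Core8 g i A2 A3 Ai Aw A.1 A' lengths values w :=
    { cur := hC
      extw := hb.extw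
      extb := hb.extw'
      extb' := hext
      k1 := by rw [hcb]; exact hb.k1.frame e
      k2 := by rw [hcb]; exact hb.k2.frame e
      rbx := by rw [hrbx]; exact hb.rbx
      r12 := by rw [hr12]; exact hb.r12
      lenL := by rw [hcb, e.entries]; exact hb.lenL.same hlenE hlenI
      dense_values := by rw [hcb, e.sparse]; exact hb.dense_values
      dense_lengths := by rw [hcb, e.sparse, e.codeword_lengths, e.entries]; exact hb.dense_lengths
      dense_codewords := by rw [hcb, e.sparse, e.codewords, e.entries]; exact hb.dense_codewords
      dense_eq := by rw [hcb, e.sparse, e.codeword_lengths]; exact hb.dense_eq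
      dense_temps := by
        rw [hcb, e.sparse, htemps]
        exact hb.dense_temps
      dense_cnt := by
        rw [hcb, e.sparse]
        intro hs
        have := hb.dense_cnt hs
        unfold CNT' at this ⊢
        rw [e.entries, e.sorted_entries, elong]
        exact this
      sparse_lengths := by rw [hcb, e.sparse, e.codeword_lengths, e.sorted_entries]; exact hb.sparse_lengths
      sparse_temps := by
        rw [hcb, e.sparse, e.codewords, e.sorted_entries, e.entries]
        intro hs
        have ht := hb.sparse_temps hs
        unfold TempsAre at ht ⊢
        rw [htemps, hB]
        exact ht
      sparse_cnt := by
        rw [hcb, e.sparse]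
        intro hs
        have := hb.sparse_cnt hs
        unfold CNT at this ⊢
        rw [e.entries, e.sorted_entries, eused]
        exact this
      fresh := by
        rw [hcb]
        have hf := hb.fresh
        refine ⟨?_, ?_, ?_⟩
        · rw [e.lookup_type]
          exact hf.lookup_type
        · rw [e.lookup_values]
          exact hf.lookup_values
        · rw [e.multiplicands]
          exact hf.multiplicands }
  refine ⟨⟨hF, hcore, ?_, ?_⟩, ?_, ?_, ?_⟩
  · -- VAL: the temp block P3 = `values` is kept
    rw [hcb, e.sparse, e.sorted_entries, e.entries]
    intro hs
    have hv := h.sparse_val hs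
    have hvk := htk _ _ ((hb.sparse_temps hs).tblock (p := values) List.mem_cons_self)
    have hvE := hvk.same
    have hvI := hvk.inside
    simp only [vblock] at hvE hvI
    exact hv.same hvE hvI
  · rw [hcb, e.sorted_entries]
    exact hse
  · rw [hcb, e.sorted_codewords]
    exact hb.fresh.sorted_codewords
  · rw [hcb, e.sorted_values]
    exact hb.fresh.sorted_values
  · rw [hcb, e.sorted_entries]
    exact halloc

/-- **`In8S` at the join 0x114710 for `SE = 0`** (the `jne` of 0x11470a not taken): nothing was stored but a return address below `R`
(`C7.built_through`, `C7.frame_through`), `Ab := A.1` (`C8.core_of_built`), K4 is its clause `null` (`Built.fresh`), K4c is vacuous. -/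
theorem c8a_join {u₀ : State} {g : Ghost} {i : Nat} {A2 A3 Ai Aw : Arena} {A : Arena × List Obj} {lengths values : Nat}
    {v w : State} (h : InC8 u₀ g i A2 A3 Ai Aw A lengths values v)
    (hs : Mem.SameExcept [⟨g.R - 8, g.R⟩] v.mem w.mem) (hun : ShadowUntouched v.mem w.mem)
    (hrip : w.rip = L.start_decoder.at_114710) (hrsp : w.reg .rsp = addr g.R) (hcode : CodeOK u₀ w.mem) (hinv : abiInv w)
    (r14 : w.reg .r14 = v.reg .r14) (rbx : w.reg .rbx = v.reg .rbx) (r12 : w.reg .r12 = v.reg .r12)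
    (hse : Codebook.sorted_entries v.mem (g.cb v.mem i) = 0) :
    In8S u₀ g i A2 A3 Ai Aw A.1 A lengths values w := by
  have hb := h.built
  have hfr := h.frame
  have hpos : Pos g A := Pos.of hfr hb.cur
  have p1 := hpos.r_eq
  have p2 := hpos.ra_lo
  have p3 := hpos.ra_hi
  have hgood : ∀ x, x ∈ [(⟨g.R - 8, g.R⟩ : Span)] → C7.GoodWin g Aw A lengths x := by
    intro x hx
    rw [List.mem_singleton.mp hx]
    left
    show g.R - 408 ≤ g.R - 8 ∧ g.R ≤ g.R
    omega
  obtain ⟨hb', ecb, e⟩ := C7.built_through hb hfr.shadow hfr.offText (by omega) (by omega) hs hun hgood r14 rbx r12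
  have hfr' : Frame u₀ g L.start_decoder.at_114710 A w :=
    C7.frame_through hfr hb.cur.sd.arena hb.cur.hand hs hun hgood hrip hrsp hcode hinv
  have hse' : Codebook.sorted_entries w.mem (g.cb w.mem i) = 0 := by
    rw [ecb, e.sorted_entries]
    exact hse
  refine ⟨hfr', C8.core_of_built hb', ?_, ?_⟩
  · refine ⟨?_, ?_, ?_, ?_⟩
    · intro h1
      rw [hse'] at h1
      exact absurd h1 (by decide)
    · intro h1
      rw [hse'] at h1
      exact absurd h1 (by decide)
    · intro h1
      rw [hse'] at h1
      exact absurd h1 (by decide)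
    · intro _
      exact ⟨hb'.fresh.sorted_codewords, hb'.fresh.sorted_values⟩
  · intro x hx
    rw [hse'] at hx
    omega

/-- `lea esi,[rax*4+4]` with `eax = SE < 2^24`: the request is `4·(SE+1)`, no 32-bit wrap. -/
theorem c8a_lea (se : Nat) (h : se < 16777216) :
    (Word.ofBV (BitVec.setWidth 32 (Word.ofBV (BitVec.ofNat 32 se) * 4 + 4).toBitVec)).toNat % 2 ^ 32 = 4 * (se + 1) := by
  have e1 : Word.ofBV (BitVec.ofNat 32 se) = addr se := by
    rw [ofBV_eq_addr _ (by decide), BitVec.toNat_ofNat]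
    congr 1
    omega
  have e4 : (4 : Word).toNat = 4 := rfl
  rw [e1, Vorbis.toNat_ofBV32, BitVec.toNat_setWidth, UInt64.toNat_toBitVec, UInt64.toNat_add, UInt64.toNat_mul,
    toNat_addr _ (by omega), e4]
  omega

/-- **Segment C8a of `start_decoder`, the walk**: the check of `c->sorted_entries` (`C7.cb_site`), `test eax, eax ; jne`; `SE = 0`: the
join 0x114710 (`c8a_join`); `SE ≥ 1`: `setup_malloc(f, 4·(SE+1))` (`c8a_malloc_pre`), and at its return cut138 both arms
(`Cur.alloc_call` / `Cur.alloc_fail_any`, the temp blocks through `c8a_tblock_kept`, `c8a_build`). -/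
theorem c8a_walk
    (Lay : Layout) (hLay : Lay.hi = 0x1000000) (μ : Microarch) (hμ : UserX.MicroOK μ) (u₀ : State)
    (hcode : HasCodeNat Lay u₀ Vorbis.L.start_decoder.entry Vorbis.Code.code_start_decoder.nat Vorbis.L.start_decoder.size)
    (h4 : Asan.SmallCheck Lay μ Vorbis.WayInv (Vorbis.CodeOK u₀) [.rax, .rcx, .rdx] 4 Vorbis.L.__asan_load4_noabort.entry)
    (hmalloc : ∀ (others : List Obj) (frames : List (Nat × FrameLayout)) (A : Arena), Calls Lay μ Vorbis.WayInv (Vorbis.conv u₀) Vorbis.L.setup_malloc.entry (Vorbis.Spec.setup_malloc.spec others frames A)) :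
    SegC8a Lay μ u₀ := by
  intro g i v hat
  obtain ⟨A, lengths, values, A2, A3, Ai, Aw, h⟩ := hat
  have he := h.frame.entry
  v_entry he
  have w_rip := h.frame.rip
  have hfr0 := h.frame
  have hb := h.built
  have hcur := h.built.cur
  have hshad := h.frame.shadow
  have hpos : Pos g A := Pos.of hfr0 hcur
  have p1 := hpos.r_eq
  have p2 := hpos.ra_lo
  have p3 := hpos.ra_hi
  have hRA : g.RA = (g.e.reg .rsp).toNat := rfl
  simp only [depth] at he_room he_stack
  have c_rsp : v.reg .rsp = g.e.reg .rsp - 1480 := by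
    rw [hfr0.rsp]
    symm
    apply eq_addr
    u_omega
  have hcr := C7.cb_range hcur
  obtain ⟨cw, hcw⟩ : ∃ cw : Word, cw = addr (g.cb v.mem i) := ⟨_, rfl⟩
  have hcwn : cw.toNat = g.cb v.mem i := by
    rw [hcw]
    exact toNat_addr _ (by omega)
  have c_r14 : v.reg .r14 = cw := by
    rw [hcw]
    exact hcur.r14
  -- the load of `c->sorted_entries` (0x114701), named before the walk
  have hse0 := hb.k2.se_nonneg
  have hseE := hb.k2.se_le
  have hEl := hb.k1.ent_lt
  obtain ⟨se, hse⟩ : ∃ se : Nat, se = (Codebook.sorted_entries v.mem (g.cb v.mem i)).toNat := ⟨_, rfl⟩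
  have hseb : se < 16777216 := by omega
  have r_se : v.mem.readLE (cw + 2112) 4 = se := by
    have e1 : cw + 2112 = addr (g.cb v.mem i + 2112) := by
      rw [hcw, addr_add_lit]
    rw [e1, hse]
    exact Mem.u32_of_i32_nonneg v.mem (g.cb v.mem i + 2112) hse0
  have sl_f : v.mem.readLE (g.e.reg .rsp - 1456) 8 = g.f := by
    have e : addr (g.R + 0x18) = g.e.reg .rsp - 1456 := by
      refine (eq_addr _ _ ?_).symm
      u_omega
    rw [← e]
    exact hcur.slot_f
  have w_eq : Mem.EqOn Vorbis.L.textLo Vorbis.L.textHi u₀.mem v.mem := h.frame.code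
  have hdf : v.flags .df = false := (show abiInv _ from h.frame.inv).1
  have hmx : v.mxcsr &&& 0x1F80 = 0x1F80 := (show abiInv _ from h.frame.inv).2
  have hsse := Vorbis.sseOK_of_abiInv h.frame.inv
  obtain ⟨hf1, hf2, hf3⟩ := c8a_obj_where hcur hshad hfr0.offText
  have hm := hmalloc A.2 g.frames' A.1
  u_walk hcode [hμ.vendor] until [Vorbis.L.start_decoder.cut138, Vorbis.L.start_decoder.at_114710] span [Vorbis.L.textLo, Vorbis.L.textHi] side (v_side)
  case check_1146fc =>
    -- 0x1146fc: the check of `c->sorted_entries` (load4 c + 840H): inside the codebooks block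
    have hun : ShadowUntouched v.mem s_1146fc.mem := by v_untouched
    apply Vorbis.Spec.check_site hfr0.shadow hun (C7.cb_site hcur 2112 4 (by omega) (by omega))
    u_omega
  case call_inv => v_inv
  case pre_1149ff =>
    have hun : ShadowUntouched v.mem s_1149ff.mem := by v_untouched
    apply c8a_malloc_pre hfr0 hcur hun
    · rw [w_mem]
      apply Mem.EqOn.writeLE
      · u_omega
      · u_omega
    · rw [w_rsp]
      u_omega
    · rw [w_rdi]
      exact toNat_addr _ (by omega)
  · -- 0x114a04 = cut138: setup_malloc(f, 4·(SE+1)) returned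
    have hse1 : 1 ≤ Codebook.sorted_entries v.mem (g.cb v.mem i) := by omega
    have ersi : (s_1149ff.reg .rsi).toNat % 2 ^ 32 =
        4 * ((Codebook.sorted_entries v.mem (g.cb v.mem i)).toNat + 1) := by
      rw [← hse, w_rsi_1149ff]
      exact c8a_lea se hseb
    simp only [X86.User.Spec.footprint, vspec] at w_same
    have e_sp : (s_1149ff.reg .rsp).toNat + 8 = g.R := by
      rw [w_rsp_1149ff]
      u_omega
    have e_a : (g.e.reg .rsp - 1488).toNat + 8 = g.R := by u_omega
    have e_rdi : (s_1149ff.reg .rdi).toNat = g.f := by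
      rw [w_rdi_1149ff]
      exact toNat_addr _ (by omega)
    have hrsp' : s_1149ffr.reg .rsp = v.reg .rsp := by
      rw [w_rsp, c_rsp]
    by_cases hfit : A.1.Fits ((s_1149ff.reg .rsi).toNat % 2 ^ 32)
    · -- the request fits: the ghost arena grows by the block of `sorted_codewords`
      obtain ⟨r1, r2, r3, r4, r5⟩ := Cur.alloc_call hfr0 hcur w_mem_1149ff e_a e_sp e_rdi w_same w_post hfit w_rip hrsp'
        (Vorbis.conv_code_eqOn w_code) w_inv (w_kept.get .r14 rfl)
      obtain ⟨ws, hall, hok⟩ := alloc_call_same hpos w_mem_1149ff e_a e_sp e_rdi w_same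
        (shadow_win_of_fits hcur.sd.arena hfit)
      have htk : ∀ q n, A.1.TBlock q n → (Block.mk q n).Kept v.mem s_1149ffr.mem :=
        fun q n hq => c8a_tblock_kept hpos hcur.sd.arena hall hok hq
      apply ReachVia.done
      refine Or.inr ⟨_, lengths, values, A2, A3, Ai, Aw, A.1,
        c8a_build h r1 r2 r3 r4 htk (A.1.extends_pushSetup _) rfl rfl (w_kept.get .rbx rfl) (w_kept.get .r12 rfl) hse1
          (Or.inr ?_)⟩
      have hsince := hcur.sd.arena.since_pushSetup ((s_1149ff.reg .rsi).toNat % 2 ^ 32)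
      rw [r5, ← ersi, Nat.add_assoc]
      exact hsince
    · -- the request does not fit: rax = 0, the same ghost (the failure clause carries the footprint of the failed call)
      obtain ⟨r1, r2, r3, r4, r5⟩ := Cur.alloc_fail_any hfr0 hcur w_mem_1149ff e_a e_sp e_rdi w_same w_post hfit
        w_rip hrsp' (Vorbis.conv_code_eqOn w_code) w_inv (w_kept.get .r14 rfl)
      obtain ⟨_, _, _, hfs⟩ := w_post.2 hfit
      obtain ⟨ws, hall, hok⟩ := c8a_fail_wins hpos w_mem_1149ff e_a e_sp e_rdi hfs
      have htk : ∀ q n, A.1.TBlock q n → (Block.mk q n).Kept v.mem s_1149ffr.mem :=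
        fun q n hq => c8a_tblock_kept hpos hcur.sd.arena hall hok hq
      apply ReachVia.done
      exact Or.inr ⟨A, lengths, values, A2, A3, Ai, Aw, A.1,
        c8a_build h r1 r2 r3 r4 htk (Arena.Extends.refl _) rfl rfl (w_kept.get .rbx rfl) (w_kept.get .r12 rfl) hse1
          (Or.inl r5)⟩
  · -- 0x114710: SE = 0, the join
    have hse0' : Codebook.sorted_entries v.mem (g.cb v.mem i) = 0 := by omega
    have hs : Mem.SameExcept [⟨g.R - 8, g.R⟩] v.mem s_11470a.mem := by
      rw [w_mem]
      apply Mem.SameExcept.writeLE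
      · u_omega
      · refine ⟨_, List.mem_cons_self, ?_, ?_⟩
        · show g.R - 8 ≤ _
          u_omega
        · show _ ≤ g.R
          u_omega
    have hun : ShadowUntouched v.mem s_11470a.mem := by v_untouched
    have hrsp' : s_11470a.reg .rsp = addr g.R := by
      rw [w_rsp]
      apply eq_addr
      u_omega
    have hinv' : abiInv s_11470a := by v_inv
    refine ReachVia.done (Or.inl ⟨A, lengths, values, A2, A3, Ai, Aw, A.1, ?_⟩)
    exact c8a_join h hs hun w_rip hrsp' w_eq hinv' (w_kept .r14 (by decide)) (w_kept .rbx (by decide))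
      (w_kept .r12 (by decide)) hse0'

end Vorbis.Spec.start_decoder_C8a
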